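-- pv_equiv track=rewrite | github.com/sieffosman/CodeWars | Prostate cancRecurrenceRatesASTRO.py | recurrence
-- ===== SOURCE A (Python) =====
-- def recurrence(values):
--     nadir = min(values)
--     i = values.index(nadir)
--     last_index = len(values) - 1
--
--     count = 0
--     for x in range(i, last_index):
--         if values[x] < values[x+1]:
--             count += 1
--         else:
--             count = 0
--
--         if count >= 3:
--             return True
--
--     return False
-- ===== SOURCE B (Python) =====
-- def recurrence(values):
--     tail = values[values.index(min(values)):]
--     rises = [y > x for x, y in zip(tail, tail[1:])]
--     return (True, True, True) in zip(rises, rises[1:], rises[2:])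
-- ===== Notes on version B (the rewrite author's own statement) =====
-- stated objective: alternative
-- what changed: A's single index-driven loop with a reset counter and early return is replaced by staged list passes: slice off the tail after the first minimum, build the pairwise-rise boolean list with zip, and test membership of (True,True,True) in the zipped triples of consecutive rises.
import Mathlib
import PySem

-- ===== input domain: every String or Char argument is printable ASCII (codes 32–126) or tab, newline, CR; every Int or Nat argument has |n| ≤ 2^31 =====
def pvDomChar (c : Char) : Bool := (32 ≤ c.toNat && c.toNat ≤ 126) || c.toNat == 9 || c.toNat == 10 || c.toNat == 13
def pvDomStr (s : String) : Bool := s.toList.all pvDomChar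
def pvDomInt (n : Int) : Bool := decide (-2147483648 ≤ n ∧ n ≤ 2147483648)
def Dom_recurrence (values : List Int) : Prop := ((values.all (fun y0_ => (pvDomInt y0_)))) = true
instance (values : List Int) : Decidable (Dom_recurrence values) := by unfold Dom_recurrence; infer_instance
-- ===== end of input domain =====

-- B replaces A's reset-counter loop by staged passes (tail slice, zip of pairwise rises, triple membership); alternative decomposition, same cost.

-- ===== PORT A =====
-- values[x] (index always in range on every use inside the loop)
def pyAt (values : List Int) (x : Int) : Int := (PySem.List.pyGet? values x).getD 0

-- A's for-loop with early return: recursion over the index list, carrying the reset counter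
def recLoopA (values : List Int) : List Int → Int → Bool
  | [], _ => false
  | x :: rest, count =>
    let count' := if pyAt values x < pyAt values (x + 1) then count + 1 else 0
    if count' ≥ 3 then true else recLoopA values rest count'

def recurrence (values : List Int) : Bool :=
  match PySem.List.min? values (fun y => y) with
  | none => false  -- unreachable: Pre_ requires values ≠ [] (Python min raises ValueError)
  | some nadir =>
    let i : Int := (((PySem.List.index? values nadir).getD 0 : Nat) : Int)
    let lastIndex : Int := (values.length : Int) - 1
    recLoopA values (PySem.List.pyRange i lastIndex 1) 0

-- ===== PORT B =====
def recurrence_alt (values : List Int) : Bool :=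
  match PySem.List.min? values (fun y => y) with
  | none => false  -- unreachable under Pre_
  | some nadir =>
    let i : Nat := (PySem.List.index? values nadir).getD 0
    let tail := PySem.List.slice values (some (i : Int)) none         -- values[i:]
    let rises := List.zipWith (fun x y => decide (x < y)) tail (tail.drop 1)
    -- (True, True, True) in zip(rises, rises[1:], rises[2:]); Python's triple is the nested pair ((a,b),c)
    ((rises.zip (rises.drop 1)).zip (rises.drop 2)).contains ((true, true), true)

-- ===== PRECONDITION & SPEC =====
-- Python's min/index raise ValueError on an empty list: excluded.
def Pre_recurrence (values : List Int) : Prop := values ≠ []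
instance (values : List Int) : Decidable (Pre_recurrence values) := by unfold Pre_recurrence; infer_instance
def pvWitness_recurrence : List Int := [3, 1, 2, 3, 4]

def Spec_recurrence (values : List Int) (out : Bool) : Prop := out = recurrence_alt values
instance (values : List Int) (out : Bool) : Decidable (Spec_recurrence values out) := by unfold Spec_recurrence; infer_instance

-- ===== CLAIM (what is proved, stated in full; the proofs are below) =====
def Claim_equal_recurrence : Prop := ∀ (values : List Int), Dom_recurrence values → Pre_recurrence values → Spec_recurrence values (recurrence values)

-- ===== LEMMAS AND PROOFS =====

-- canonical form both sides reduce to: three consecutive trues in a boolean list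
def hasRun3 : List Bool → Bool
  | true :: true :: true :: _ => true
  | _ :: rest => hasRun3 rest
  | [] => false

-- A's counter loop, abstracted to the list of rise booleans
def cloop : List Bool → Int → Bool
  | [], _ => false
  | b :: rest, c =>
    let c' := if b then c + 1 else 0
    if c' ≥ 3 then true else cloop rest c'

lemma recLoopA_eq_cloop (values : List Int) :
    ∀ (r : List Int) (c : Int),
      recLoopA values r c
        = cloop (r.map (fun x => decide (pyAt values x < pyAt values (x + 1)))) c := by
  intro r
  induction r with
  | nil => intro c; rfl
  | cons x rest ih =>
    intro c
    simp only [recLoopA, cloop, List.map]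
    by_cases h : pyAt values x < pyAt values (x + 1) <;> simp [h, ih]

lemma cloop_eq_hasRun3 :
    ∀ (bs : List Bool) (c : Int), (c = 0 ∨ c = 1 ∨ c = 2) →
      cloop bs c = hasRun3 (List.replicate c.toNat true ++ bs) := by
  intro bs
  induction bs with
  | nil =>
    intro c hc
    rcases hc with h | h | h <;> subst h <;> rfl
  | cons b rest ih =>
    intro c hc
    cases b with
    | false =>
      have h0 : cloop (false :: rest) c = cloop rest 0 := by
        simp [cloop]
      rw [h0, ih 0 (by norm_num)]
      rcases hc with h | h | h <;> subst h <;> simp [hasRun3]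
    | true =>
      rcases hc with h | h | h <;> subst h
      · have : cloop (true :: rest) 0 = cloop rest 1 := by simp [cloop]
        rw [this, ih 1 (by norm_num)]
        rfl
      · have : cloop (true :: rest) 1 = cloop rest 2 := by simp [cloop]
        rw [this, ih 2 (by norm_num)]
        rfl
      · simp [cloop, hasRun3]

-- B's triple-zip membership equals the same canonical predicate
lemma zip3_contains_eq_hasRun3 :
    ∀ (l : List Bool),
      ((l.zip (l.drop 1)).zip (l.drop 2)).contains ((true, true), true) = hasRun3 l := by
  intro l
  induction l with
  | nil => rfl
  | cons a t ih =>
    cases t with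
    | nil => cases a <;> rfl
    | cons b u =>
      cases u with
      | nil => cases a <;> cases b <;> rfl
      | cons c v =>
        have hzip :
            (((a :: b :: c :: v).zip ((a :: b :: c :: v).drop 1)).zip
              ((a :: b :: c :: v).drop 2))
              = (((a, b), c) ::
                 (((b :: c :: v).zip ((b :: c :: v).drop 1)).zip ((b :: c :: v).drop 2))) := by
          simp
        rw [hzip, List.contains_cons, ih]
        cases a <;> cases b <;> cases c <;> simp [hasRun3]

-- the rise booleans A reads by index equal B's zipWith over the tail
lemma map_range_eq_zipWith (values : List Int) :
    ∀ (n : Nat) (i : Nat), values.length - i ≤ n →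
      (PySem.List.pyRange (i : Int) ((values.length : Int) - 1) 1).map
          (fun x => decide (pyAt values x < pyAt values (x + 1)))
        = List.zipWith (fun x y => decide (x < y)) (values.drop i) (values.drop (i + 1)) := by
  intro n
  induction n with
  | zero =>
    intro i hle
    have hlen : values.length ≤ i := by omega
    rw [PySem.List.pyRange_one_eq_nil (by omega), List.drop_eq_nil_of_le hlen]
    simp
  | succ n ih =>
    intro i hle
    by_cases hlt : i + 1 < values.length
    · have hi : (i : Int) < (values.length : Int) - 1 := by omega
      have hcast : ((i : Int) + 1) = ((i + 1 : Nat) : Int) := by push_cast; ring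
      have hA1 : pyAt values (i : Int) = values[i]'(by omega) := by
        simp only [pyAt, PySem.List.pyGet?_natCast,
          List.getElem?_eq_getElem (show i < values.length by omega), Option.getD_some]
      have hA2 : pyAt values ((i + 1 : Nat) : Int) = values[i + 1]'(by omega) := by
        simp only [pyAt, PySem.List.pyGet?_natCast,
          List.getElem?_eq_getElem hlt, Option.getD_some]
      have hd1 : values.drop i = values[i]'(by omega) :: values.drop (i + 1) :=
        (List.getElem_cons_drop (by omega)).symm
      have hd2 : values.drop (i + 1) = values[i + 1]'(by omega) :: values.drop (i + 2) :=
        (List.getElem_cons_drop hlt).symm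
      rw [PySem.List.pyRange_one_cons hi, List.map_cons, hcast, ih (i + 1) (by omega),
          hd1, hd2, List.zipWith_cons_cons, hA1, hA2, show i + 1 + 1 = i + 2 from by omega]
    · -- tail too short: both sides empty
      rw [PySem.List.pyRange_one_eq_nil (by omega),
          List.drop_eq_nil_of_le (show values.length ≤ i + 1 by omega)]
      simp

-- ===== VERDICT (by name: the statement is the Claim_ definition above) =====
theorem recurrence_spec : Claim_equal_recurrence := by
  intro values _ _
  unfold Spec_recurrence recurrence recurrence_alt
  cases hmin : PySem.List.min? values (fun y => y) with
  | none => rfl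
  | some nadir =>
    simp only []
    set i : Nat := (PySem.List.index? values nadir).getD 0 with hi
    rw [recLoopA_eq_cloop, cloop_eq_hasRun3 _ 0 (by norm_num),
        map_range_eq_zipWith values values.length i (by omega)]
    rw [PySem.List.slice_from_natCast]
    rw [zip3_contains_eq_hasRun3]
    have : values.drop (i + 1) = (values.drop i).drop 1 := by
      rw [List.drop_drop]
    rw [this]
    simp
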